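-- pv_equiv track=rewrite | github.com/fkhalid/genonets | genonets/genonets_reader.py | build_genotype_to_set_dict
-- ===== SOURCE A (Python) =====
-- def build_genotype_to_set_dict(genotypes, data_dict):
--     genotype_to_set_dict = {}
--
--     # For each sequence in the given list of genotypes,
--     for seq in genotypes:
--         # Initialize the list genotype sets
--         genotype_to_set_dict[seq] = []
--
--         # For each genotype set in the given data dictionary,
--         for rep in data_dict.keys():
--             # If the sequence exists in the genotype set,
--             if seq in data_dict[rep]:
--                 # Append the genotype set name to the list of values
--                 # for this sequence
--                 genotype_to_set_dict[seq].append(rep)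
--
--     return genotype_to_set_dict
-- ===== SOURCE B (Python) =====
-- def build_genotype_to_set_dict(genotypes, data_dict):
--     # Invert data_dict once: element -> list of reps containing it (ordered dedup
--     # per rep so a duplicated element still contributes the rep only once).
--     inv = {}
--     for rep, elems in data_dict.items():
--         for x in dict.fromkeys(elems):
--             inv.setdefault(x, []).append(rep)
--     return {seq: inv.get(seq, []) for seq in genotypes}
-- ===== Notes on version B (the rewrite author's own statement) =====
-- stated objective: faster
-- what changed: B builds an inverted index (element -> reps) in one pass over data_dict and answers each genotype with a single dict lookup, replacing A's membership scan of every rep's list for every genotype.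
import Mathlib
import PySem

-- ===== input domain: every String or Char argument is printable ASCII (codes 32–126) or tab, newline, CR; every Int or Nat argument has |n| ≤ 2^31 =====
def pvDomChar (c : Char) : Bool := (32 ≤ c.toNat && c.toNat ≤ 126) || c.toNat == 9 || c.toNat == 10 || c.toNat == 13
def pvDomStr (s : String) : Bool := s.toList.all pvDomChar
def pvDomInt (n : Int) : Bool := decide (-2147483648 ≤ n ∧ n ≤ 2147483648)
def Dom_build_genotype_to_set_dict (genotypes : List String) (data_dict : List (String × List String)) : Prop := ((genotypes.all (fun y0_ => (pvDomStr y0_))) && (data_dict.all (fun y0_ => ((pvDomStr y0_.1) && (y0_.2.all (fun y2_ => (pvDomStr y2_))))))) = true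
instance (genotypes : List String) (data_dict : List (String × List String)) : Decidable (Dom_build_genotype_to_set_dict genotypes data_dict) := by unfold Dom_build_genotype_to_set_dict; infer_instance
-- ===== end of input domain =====

-- B inverts data_dict in one pass (element -> reps) and then answers each genotype by a
-- dictionary lookup, instead of A's scan of every rep's list for every genotype; objective: faster.


-- ===== PORT A =====
def build_genotype_to_set_dict (genotypes : List String) (data_dict : List (String × List String)) : List (String × List String) :=
  let d := PySem.Dict.ofList data_dict
  (genotypes.foldl (fun out seq =>
      -- genotype_to_set_dict[seq] = []  then the inner loop over data_dict.keys()
      (d.keys.foldl (fun out rep =>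
          if seq ∈ d.getD rep [] then out.modify seq [] (· ++ [rep]) else out)
        (out.insert seq [])))
    PySem.Dict.empty).items

-- ===== PORT B =====
def build_genotype_to_set_dict_alt (genotypes : List String) (data_dict : List (String × List String)) : List (String × List String) :=
  let d := PySem.Dict.ofList data_dict
  -- inv: element -> list of reps whose set contains it (dict.fromkeys = ordered dedup)
  let inv := d.items.foldl (fun inv p =>
      (PySem.List.dedup p.2).foldl (fun inv x => inv.modify x [] (· ++ [p.1])) inv)
    PySem.Dict.empty
  -- {seq: inv.get(seq, []) for seq in genotypes}
  (genotypes.foldl (fun out seq => out.insert seq (inv.getD seq [])) PySem.Dict.empty).items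

-- ===== PRECONDITION & SPEC =====
def Spec_build_genotype_to_set_dict (genotypes : List String) (data_dict : List (String × List String)) (out : List (String × List String)) : Prop := out = build_genotype_to_set_dict_alt genotypes data_dict
instance (genotypes : List String) (data_dict : List (String × List String)) (out : List (String × List String)) : Decidable (Spec_build_genotype_to_set_dict genotypes data_dict out) := by unfold Spec_build_genotype_to_set_dict; infer_instance

-- ===== CLAIM (what is proved, stated in full; the proofs are below) =====
def Claim_equal_build_genotype_to_set_dict : Prop := ∀ (genotypes : List String) (data_dict : List (String × List String)), Dom_build_genotype_to_set_dict genotypes data_dict → Spec_build_genotype_to_set_dict genotypes data_dict (build_genotype_to_set_dict genotypes data_dict)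

-- ===== LEMMAS AND PROOFS =====

theorem pv_modify_eq_insert (d : PySem.Dict String (List String)) (k : String)
    (f : List String → List String) :
    d.modify k [] f = d.insert k (f (d.getD k [])) :=
  PySem.Dict.ext_iff.mpr rfl

-- A's inner loop over the reps, started on out.insert seq v0, only ever rewrites the entry at
-- seq: it equals a single insert of the accumulated rep list.
theorem pv_inner_A (d : PySem.Dict String (List String)) (seq : String) :
    ∀ (L : List String) (out : PySem.Dict String (List String)) (v0 : List String),
      L.foldl (fun out rep => if seq ∈ d.getD rep [] then out.modify seq [] (· ++ [rep]) else out)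
        (out.insert seq v0)
      = out.insert seq
          (L.foldl (fun acc rep => if seq ∈ d.getD rep [] then acc ++ [rep] else acc) v0) := by
  intro L
  induction L with
  | nil => intro out v0; rfl
  | cons r t ih =>
    intro out v0
    simp only [List.foldl_cons]
    by_cases h : seq ∈ d.getD r []
    · simp only [h, if_pos]
      rw [pv_modify_eq_insert, PySem.Dict.getD_insert_self, PySem.Dict.insert_insert_self, ih]
    · simp only [h, if_neg, not_false_iff, ih]

-- One rep's pass in B: appending r at each distinct element of xs adds r to inv[seq] exactly
-- when seq ∈ xs.
theorem pv_inner_B (r seq : String) :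
    ∀ (xs : List String), xs.Nodup → ∀ (inv : PySem.Dict String (List String)),
      (xs.foldl (fun inv x => inv.modify x [] (· ++ [r])) inv).getD seq []
      = inv.getD seq [] ++ (if seq ∈ xs then [r] else []) := by
  intro xs
  induction xs with
  | nil => intro _ inv; simp
  | cons x t ih =>
    intro hx inv
    obtain ⟨hnx, hnt⟩ := List.nodup_cons.mp hx
    simp only [List.foldl_cons]
    rw [ih hnt, PySem.Dict.getD_modify]
    by_cases h : seq = x
    · subst h
      simp only [List.mem_cons, true_or, if_pos]
      rw [if_neg (fun hm => hnx hm)]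
      simp
    · simp only [if_neg h, List.mem_cons]
      have : (seq = x ∨ seq ∈ t) ↔ seq ∈ t := by tauto
      rw [if_congr this rfl rfl]

-- B's whole inversion loop, read back at seq.
theorem pv_inv_getD (seq : String) :
    ∀ (l : List (String × List String)) (inv : PySem.Dict String (List String)),
      (l.foldl (fun inv p =>
          (PySem.List.dedup p.2).foldl (fun inv x => inv.modify x [] (· ++ [p.1])) inv) inv).getD seq []
      = inv.getD seq [] ++ (l.filter (fun p => decide (seq ∈ p.2))).map (·.1) := by
  intro l
  induction l with
  | nil => intro inv; simp
  | cons p t ih =>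
    intro inv
    simp only [List.foldl_cons]
    rw [ih, pv_inner_B p.1 seq _ (PySem.List.nodup_dedup p.2)]
    by_cases h : seq ∈ p.2
    · rw [if_pos ((PySem.List.mem_dedup _ _).mpr h)]
      simp [h]
    · rw [if_neg (fun hm => h ((PySem.List.mem_dedup _ _).mp hm))]
      simp [h]

-- A's accumulated rep list for seq, over the keys of a nodup-keyed dict, is the same filter.
theorem pv_val_A (d : PySem.Dict String (List String)) (hnd : d.keys.Nodup) (seq : String) :
    d.keys.foldl (fun acc rep => if seq ∈ d.getD rep [] then acc ++ [rep] else acc) []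
    = (d.items.filter (fun p => decide (seq ∈ p.2))).map (·.1) := by
  have hkeys : d.keys = d.items.map (·.1) := rfl
  rw [hkeys, List.foldl_map]
  have : ∀ (l : List (String × List String)),
      (∀ p ∈ l, d.getD p.1 [] = p.2) → ∀ (acc : List String),
      l.foldl (fun acc p => if seq ∈ d.getD p.1 [] then acc ++ [p.1] else acc) acc
      = acc ++ (l.filter (fun p => decide (seq ∈ p.2))).map (·.1) := by
    intro l
    induction l with
    | nil => intro _ acc; simp
    | cons p t ih =>
      intro hmem acc
      simp only [List.foldl_cons]
      rw [hmem p (List.mem_cons_self), ih (fun q hq => hmem q (List.mem_cons_of_mem _ hq))]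
      by_cases h : seq ∈ p.2 <;> simp [h]
  have hall : ∀ p ∈ d.items, d.getD p.1 [] = p.2 := by
    intro p hp
    obtain ⟨k, v⟩ := p
    exact PySem.Dict.getD_of_mem_items d hp hnd []
  rw [this d.items hall []]
  simp

-- ===== VERDICT (by name: the statement is the Claim_ definition above) =====
theorem build_genotype_to_set_dict_spec : Claim_equal_build_genotype_to_set_dict := by
  intro genotypes data_dict _
  unfold Spec_build_genotype_to_set_dict build_genotype_to_set_dict build_genotype_to_set_dict_alt
  refine congrArg PySem.Dict.items (PySem.List.foldl_congr_mem _ _ _ _ ?_)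
  intro out seq _
  rw [pv_inner_A]
  congr 1
  rw [pv_val_A _ (PySem.Dict.nodup_keys_ofList data_dict) seq, pv_inv_getD]
  simp
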